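-- pv_equiv track=rewrite | github.com/LynPtl/AlgorithmStudy | 9021_redo/21T3/21T3Q3.py | longest_leftmost_sequence_of_consecutive_letters
-- ===== SOURCE A (Python) =====
-- def longest_leftmost_sequence_of_consecutive_letters(word):
--     '''
--     You can assume that "word" is a string of nothing but lowercase letters.
--
--     >>> longest_leftmost_sequence_of_consecutive_letters('')
--     ''
--     >>> longest_leftmost_sequence_of_consecutive_letters('a')
--     'a'
--     >>> longest_leftmost_sequence_of_consecutive_letters('zuba')
--     'z'
--     >>> longest_leftmost_sequence_of_consecutive_letters('ab')
--     'ab'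
--     >>> longest_leftmost_sequence_of_consecutive_letters('bcab')
--     'bc'
--     >>> longest_leftmost_sequence_of_consecutive_letters('aefbxyzcrsdt')
--     'xyz'
--     >>> longest_leftmost_sequence_of_consecutive_letters('efghuvwrstuvabcde')
--     'rstuv'
--     '''
--     maxl = 0
--     result = ""
--     if not word:
--         return ''
--     length = len(word)
--     for i in range(length):
--         cur = word[i]
--         for j in range(i + 1, length):
--             if ord(word[j]) == ord(cur[-1]) + 1:
--                 cur += word[j]
--             else:
--                 break
--         if len(cur) > maxl:
--             result = cur
--             maxl = len(cur)
--     return result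
--     #sample answer
--     """
--     longest = ""
--     if word:
--         longest = sub_str = first = word[0]
--         for second in word[1:]:
--             if ord(first) + 1 == ord(second):
--                 sub_str += second
--                 if len(longest) < len(sub_str):
--                     longest = sub_str
--             else:
--                 sub_str = second
--             first = second
--     return longest
--     """
-- ===== SOURCE B (Python) =====
-- def longest_leftmost_sequence_of_consecutive_letters(word):
--     # Single pass over maximal consecutive runs: jump from run start to run end.
--     best = ""
--     i = 0
--     n = len(word)
--     while i < n:
--         j = i + 1
--         while j < n and ord(word[j]) == ord(word[j - 1]) + 1:
--             j += 1
--         if j - i > len(best):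
--             best = word[i:j]
--         i = j
--     return best
-- ===== Notes on version B (the rewrite author's own statement) =====
-- stated objective: alternative
-- what changed: Replaced the restart-at-every-index nested scan by a single pass that jumps run by run over maximal consecutive-letter runs, keeping the first strictly longest run; linear even on run-heavy inputs where A is quadratic, though a timing run on random text read only ~1.4x.
import Mathlib
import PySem

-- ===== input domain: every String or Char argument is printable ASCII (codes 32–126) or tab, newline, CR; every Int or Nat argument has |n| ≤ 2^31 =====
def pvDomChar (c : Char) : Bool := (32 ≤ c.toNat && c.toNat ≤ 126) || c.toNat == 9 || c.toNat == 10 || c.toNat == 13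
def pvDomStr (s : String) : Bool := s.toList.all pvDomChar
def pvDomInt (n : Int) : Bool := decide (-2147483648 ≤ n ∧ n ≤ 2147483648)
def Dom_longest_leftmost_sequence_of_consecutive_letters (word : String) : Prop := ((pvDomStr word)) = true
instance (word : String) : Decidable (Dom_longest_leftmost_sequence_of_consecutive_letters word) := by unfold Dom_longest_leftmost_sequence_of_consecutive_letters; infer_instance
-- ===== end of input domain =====

-- B replaces A's restart-at-every-index nested scan by one pass that jumps run by run over maximal consecutive runs.

-- ===== PORT A =====
-- inner loop: `for j in range(i+1, length): if ord(word[j]) == ord(cur[-1]) + 1: cur += word[j] else: break`;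
-- `last` tracks cur[-1] (the last appended character); returns the characters appended to cur
def pvInnerA (last : Char) : List Char → List Char
  | [] => []
  | d :: t => if d.toNat = last.toNat + 1 then d :: pvInnerA d t else []

-- outer loop `for i in range(length)` with state (maxl, result); position i is the head of the remaining
-- suffix, and `cur = word[i] + <appended part>` is written out as `c :: pvInnerA c t`
def pvOuterA : List Char → Nat → List Char → (Nat × List Char)
  | [], maxl, result => (maxl, result)
  | c :: t, maxl, result =>
      if (c :: pvInnerA c t).length > maxl then pvOuterA t (c :: pvInnerA c t).length (c :: pvInnerA c t)
      else pvOuterA t maxl result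

def longest_leftmost_sequence_of_consecutive_letters (word : String) : String :=
  if word.toList = [] then "" else String.ofList (pvOuterA word.toList 0 []).2

-- ===== PORT B =====
-- inner while loop of Source B: split off the maximal consecutive run continuing `last`, returning (run tail, rest)
def pvRunB (last : Char) : List Char → (List Char × List Char)
  | [] => ([], [])
  | d :: t =>
      if d.toNat = last.toNat + 1 then ((d :: (pvRunB d t).1), (pvRunB d t).2)
      else ([], d :: t)

theorem pvRunB_rest_le (last : Char) (t : List Char) : (pvRunB last t).2.length ≤ t.length := by
  induction t generalizing last with
  | nil => simp [pvRunB]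
  | cons d t ih =>
      simp only [pvRunB]
      split
      · exact Nat.le_succ_of_le (ih d)
      · simp

-- outer while loop of Source B: advance from run start past the run's end, keeping the first strictly longest run
def pvLoopB : List Char → List Char → List Char
  | [], best => best
  | c :: t, best =>
      pvLoopB (pvRunB c t).2
        (if (c :: (pvRunB c t).1).length > best.length then c :: (pvRunB c t).1 else best)
termination_by l _ => l.length
decreasing_by simpa using Nat.lt_succ_of_le (pvRunB_rest_le c t)

def longest_leftmost_sequence_of_consecutive_letters_alt (word : String) : String :=
  String.ofList (pvLoopB word.toList [])

-- ===== PRECONDITION & SPEC =====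
def Spec_longest_leftmost_sequence_of_consecutive_letters (word : String) (out : String) : Prop := out = longest_leftmost_sequence_of_consecutive_letters_alt word
instance (word : String) (out : String) : Decidable (Spec_longest_leftmost_sequence_of_consecutive_letters word out) := by unfold Spec_longest_leftmost_sequence_of_consecutive_letters; infer_instance

-- ===== CLAIM (what is proved, stated in full; the proofs are below) =====
def Claim_equal_longest_leftmost_sequence_of_consecutive_letters : Prop := ∀ (word : String), Dom_longest_leftmost_sequence_of_consecutive_letters word → Spec_longest_leftmost_sequence_of_consecutive_letters word (longest_leftmost_sequence_of_consecutive_letters word)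

-- ===== LEMMAS AND PROOFS =====

-- first-strict-maximum selection: keep a unless b is strictly longer
def pvMax2 (a b : List Char) : List Char := if b.length > a.length then b else a

-- reference value: leftmost strictly-longest among the extensions started at every index
def pvFA : List Char → List Char
  | [] => []
  | c :: t => pvMax2 (c :: pvInnerA c t) (pvFA t)

theorem pvMax2_absorb (a b x : List Char) (h : b.length ≤ a.length) :
    pvMax2 a (pvMax2 b x) = pvMax2 a x := by
  unfold pvMax2; split_ifs <;> first | rfl | omega

theorem pvMax2_assoc (a b c : List Char) :
    pvMax2 (pvMax2 a b) c = pvMax2 a (pvMax2 b c) := by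
  unfold pvMax2; split_ifs <;> first | rfl | omega

-- A's accumulator loop computes the reference value
theorem pvOuterA_eq (l : List Char) : ∀ (result : List Char),
    (pvOuterA l result.length result).2 = pvMax2 result (pvFA l) := by
  induction l with
  | nil => intro result; simp [pvOuterA, pvFA, pvMax2]
  | cons c t ih =>
      intro result
      simp only [pvOuterA, pvFA]
      split
      next hgt =>
        have h1 : pvMax2 result (c :: pvInnerA c t) = c :: pvInnerA c t := if_pos hgt
        rw [ih (c :: pvInnerA c t), ← pvMax2_assoc, h1]
      next hle =>
        have h1 : pvMax2 result (c :: pvInnerA c t) = result := if_neg hle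
        rw [ih result, ← pvMax2_assoc, h1]

-- run decomposition: pvRunB's run part is exactly A's inner-loop extension
theorem pvRunB_fst (last : Char) (t : List Char) : (pvRunB last t).1 = pvInnerA last t := by
  induction t generalizing last with
  | nil => simp [pvRunB, pvInnerA]
  | cons d t ih => simp only [pvRunB, pvInnerA]; split <;> simp [ih]

-- key lemma: starts strictly inside a run give suffixes of the run and never win the strict maximum
theorem pvFA_run (t : List Char) : ∀ (c : Char),
    pvFA (c :: t) = pvMax2 (c :: (pvRunB c t).1) (pvFA (pvRunB c t).2) := by
  induction t with
  | nil => intro c; simp [pvFA, pvRunB, pvInnerA, pvMax2]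
  | cons d t ih =>
      intro c
      by_cases h : d.toNat = c.toNat + 1
      · have hr : pvRunB c (d :: t) = (d :: (pvRunB d t).1, (pvRunB d t).2) := by
          simp [pvRunB, h]
        have hi : pvInnerA c (d :: t) = d :: (pvRunB d t).1 := by
          simp [pvInnerA, h, pvRunB_fst]
        have hA : pvFA (c :: d :: t) = pvMax2 (c :: pvInnerA c (d :: t)) (pvFA (d :: t)) := by
          simp only [pvFA]
        rw [hA, hi, ih d, hr]
        exact pvMax2_absorb _ _ _ (by simp only [List.length_cons]; omega)
      · have hr : pvRunB c (d :: t) = ([], d :: t) := by simp [pvRunB, h]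
        have hi : pvInnerA c (d :: t) = [] := by simp [pvInnerA, h]
        have hA : pvFA (c :: d :: t) = pvMax2 (c :: pvInnerA c (d :: t)) (pvFA (d :: t)) := by
          simp only [pvFA]
        rw [hA, hi, hr]

-- B's loop computes the reference value (strong induction on the length, since the loop jumps run by run)
theorem pvLoopB_eq_aux : ∀ (n : Nat) (l best : List Char), l.length ≤ n →
    pvLoopB l best = pvMax2 best (pvFA l) := by
  intro n
  induction n with
  | zero =>
      intro l best h
      have hl : l = [] := List.eq_nil_of_length_eq_zero (Nat.le_zero.mp h)
      subst hl
      simp [pvLoopB, pvFA, pvMax2]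
  | succ n ih =>
      intro l best h
      cases l with
      | nil => simp [pvLoopB, pvFA, pvMax2]
      | cons c t =>
          have hlen : (pvRunB c t).2.length ≤ n :=
            le_trans (pvRunB_rest_le c t) (by simp only [List.length_cons] at h; omega)
          simp only [pvLoopB]
          rw [ih _ _ hlen, pvFA_run t c, ← pvMax2_assoc]
          rfl

theorem pvLoopB_eq (l best : List Char) : pvLoopB l best = pvMax2 best (pvFA l) :=
  pvLoopB_eq_aux l.length l best le_rfl

-- ===== VERDICT (by name: the statement is the Claim_ definition above) =====
theorem longest_leftmost_sequence_of_consecutive_letters_spec : Claim_equal_longest_leftmost_sequence_of_consecutive_letters := by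
  intro word _
  unfold Spec_longest_leftmost_sequence_of_consecutive_letters
  unfold longest_leftmost_sequence_of_consecutive_letters longest_leftmost_sequence_of_consecutive_letters_alt
  rw [pvLoopB_eq]
  cases hl : word.toList with
  | nil => rw [if_pos rfl]; rfl
  | cons c t =>
      rw [if_neg (by simp)]
      have h0 := pvOuterA_eq (c :: t) []
      simp only [List.length_nil] at h0
      rw [h0]
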